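-- pv_equiv track=rewrite | github.com/yiming1012/MyLeetCode | LeetCode/数组/915. 分割数组.py | partitionDisjoint2
-- ===== SOURCE A (Python) =====
-- from typing import List
--
-- def partitionDisjoint2(A: List[int]) -> int:
--     """
--     思路：
--     1. 每次记录截止当前的最大值，当出现一个值小于当前最大值时，记录当前index
--     2. 如果后面的子序列都比当前最大值大，则不会更新index
--     """
--     n = len(A)
--     index = 0
--     cur = leftMax = A[0]
--     for i in range(n):
--         leftMax = max(leftMax, A[i])
--         if A[i] < cur:
--             cur = leftMax
--             index = i
--     return index + 1
-- ===== SOURCE B (Python) =====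
-- def partitionDisjoint2(A):
--     n = len(A)
--     leftMax = [A[0]] * n
--     for i in range(1, n):
--         leftMax[i] = max(leftMax[i - 1], A[i])
--     rightMin = [A[-1]] * n
--     for i in range(n - 2, -1, -1):
--         rightMin[i] = min(rightMin[i + 1], A[i])
--     for i in range(n - 1):
--         if leftMax[i] <= rightMin[i + 1]:
--             return i + 1
--     return n
-- ===== Notes on version B (the rewrite author's own statement) =====
-- stated objective: alternative
-- what changed: Replaces A's single stateful pass (running max, lagging 'cur', last-dip index) by the classic prefix-max array / suffix-min array construction with a left-to-right scan returning the first index where leftMax[i] <= rightMin[i+1].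
import Mathlib
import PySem

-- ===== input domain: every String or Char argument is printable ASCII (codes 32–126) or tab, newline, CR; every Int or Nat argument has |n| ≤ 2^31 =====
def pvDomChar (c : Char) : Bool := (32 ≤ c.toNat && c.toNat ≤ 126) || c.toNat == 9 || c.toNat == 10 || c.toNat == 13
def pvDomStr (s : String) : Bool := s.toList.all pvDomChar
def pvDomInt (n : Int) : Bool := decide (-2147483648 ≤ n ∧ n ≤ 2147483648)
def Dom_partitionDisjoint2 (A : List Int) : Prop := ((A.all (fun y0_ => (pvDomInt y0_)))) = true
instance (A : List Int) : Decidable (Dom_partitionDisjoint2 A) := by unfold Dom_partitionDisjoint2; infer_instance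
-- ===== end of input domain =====

-- Header: B replaces A's single stateful pass by prefix-max/suffix-min arrays with a
-- first-hit scan (alternative algorithm of the same cost); A raises IndexError on empty input (excluded by Pre_).

-- ===== PORT A =====
-- for i in range(n): uses leftMax/cur/index state; iterating the list with its index counter.
def pvLoopA : List Int -> Int -> Int -> Int -> Int -> Int
  | [], index, _cur, _leftMax, _i => index
  | x :: xs, index, cur, leftMax, i =>
      let leftMax := max leftMax x
      if x < cur then pvLoopA xs i leftMax leftMax (i + 1)
      else pvLoopA xs index cur leftMax (i + 1)

def partitionDisjoint2 (A : List Int) : Int :=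
  match A with
  | [] => 0  -- Python raises IndexError reading the first element; excluded by Pre_
  | a :: _ => pvLoopA A 0 a a 0 + 1

-- ===== PORT B =====
-- leftMax[i] = max(A[0..i]), built forward
def pvPrefMaxes : Int -> List Int -> List Int
  | m, [] => [m]
  | m, x :: xs => m :: pvPrefMaxes (max m x) xs

-- rightMin[i] = min(A[i..n-1]), built backward
def pvSuffixMins : List Int -> List Int
  | [] => []
  | x :: xs => min x ((pvSuffixMins xs).headD x) :: pvSuffixMins xs

-- for i in range(n-1): return i+1 at the first hit, else the default n
def pvFirstHitD : List (Int × Int) -> Int -> Int -> Int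
  | [], _, d => d
  | (l, r) :: rest, i, d => if l <= r then i else pvFirstHitD rest (i + 1) d

def partitionDisjoint2_alt (A : List Int) : Int :=
  match A with
  | [] => 0  -- first-element read raises IndexError; excluded by Pre_
  | a :: t =>
      let lm := pvPrefMaxes a t
      let rm := pvSuffixMins (a :: t)
      pvFirstHitD (lm.zip rm.tail) 1 ((a :: t).length : Int)

-- ===== PRECONDITION & SPEC =====
-- Pre_ excludes only the empty list, on which the Python A (and B) raises IndexError reading the first element.
def Pre_partitionDisjoint2 (A : List Int) : Prop := A ≠ []
instance (A : List Int) : Decidable (Pre_partitionDisjoint2 A) := by unfold Pre_partitionDisjoint2; infer_instance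
def pvWitness_partitionDisjoint2 : List Int := [5, 0, 3, 8, 6]

def Spec_partitionDisjoint2 (A : List Int) (out : Int) : Prop := out = partitionDisjoint2_alt A
instance (A : List Int) (out : Int) : Decidable (Spec_partitionDisjoint2 A out) := by unfold Spec_partitionDisjoint2; infer_instance

-- ===== CLAIM (what is proved, stated in full; the proofs are below) =====
def Claim_equal_partitionDisjoint2 : Prop := ∀ (A : List Int), Dom_partitionDisjoint2 A → Pre_partitionDisjoint2 A → Spec_partitionDisjoint2 A (partitionDisjoint2 A)

-- ===== LEMMAS AND PROOFS =====


-- head of the suffix-min list bounds the whole suffix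
lemma pv_le_suffixMins (xs : List Int) : ∀ (x c : Int),
    (c ≤ min x ((pvSuffixMins xs).headD x) ↔ ∀ y ∈ x :: xs, c ≤ y) := by
  induction xs with
  | nil => intro x c; simp [pvSuffixMins]
  | cons z zs ih =>
      intro x c
      simp only [pvSuffixMins, List.headD_cons, le_min_iff, List.mem_cons]
      constructor
      · rintro ⟨hx, hz⟩ y hy
        rcases hy with rfl | hy
        · exact hx
        · exact ((ih z c).mp (le_min_iff.mpr hz)) y (by simpa using hy)
      · intro h
        refine ⟨h x (Or.inl rfl), ?_⟩
        have := (ih z c).mpr (by intro y hy; exact h y (Or.inr (by simpa using hy)))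
        exact le_min_iff.mp this

-- if no remaining element dips below cur, A's loop never updates index
lemma pvLoopA_const (s : List Int) : ∀ (index cur m i : Int),
    (∀ y ∈ s, cur ≤ y) → pvLoopA s index cur m i = index := by
  induction s with
  | nil => intro index cur m i _; rfl
  | cons x xs ih =>
      intro index cur m i h
      have hx : ¬ x < cur := not_lt.mpr (h x (List.mem_cons_self ..))
      simp only [pvLoopA, hx, if_false]
      exact ih index cur (max m x) (i + 1) (fun y hy => h y (List.mem_cons_of_mem _ hy))

-- synchronized invariant: A's loop result + 1 equals B's remaining first-hit scan
lemma pv_main (s : List Int) : ∀ (m cur index i : Int),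
    cur ≤ m →
    ((∃ y ∈ s, y < cur) ∨ (index + 1 = i ∧ cur = m)) →
    pvLoopA s index cur m i + 1
      = pvFirstHitD ((pvPrefMaxes m s).zip (pvSuffixMins s)) i (i + (s.length : Int)) := by
  induction s with
  | nil =>
      intro m cur index i _ h
      rcases h with ⟨y, hy, _⟩ | ⟨hi, _⟩
      · simp at hy
      · simp [pvLoopA, pvPrefMaxes, pvSuffixMins, pvFirstHitD, hi]
  | cons x xs ih =>
      intro m cur index i hcm h
      simp only [pvPrefMaxes, pvSuffixMins, List.zip_cons_cons, pvFirstHitD]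
      by_cases hexit : m ≤ min x ((pvSuffixMins xs).headD x)
      · -- B returns i here; every remaining element is ≥ m ≥ cur, so A keeps index
        have hall : ∀ y ∈ x :: xs, cur ≤ y := fun y hy =>
          le_trans hcm (((pv_le_suffixMins xs x m).mp hexit) y hy)
        rcases h with ⟨y, hy, hlt⟩ | ⟨hi, _⟩
        · exact absurd (hall y hy) (not_le.mpr hlt)
        · rw [if_pos hexit, pvLoopA_const (x :: xs) index cur _ i hall, hi]
      · rw [if_neg hexit]
        have hdip : ∃ y ∈ x :: xs, y < m := by
          by_contra hk
          push Not at hk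
          exact hexit ((pv_le_suffixMins xs x m).mpr fun y hy => hk y hy)
        have hlen : i + ((x :: xs).length : Int) = (i + 1) + (xs.length : Int) := by
          simp [List.length_cons]; ring
        rw [hlen]
        by_cases hx : x < cur
        · simp only [pvLoopA, hx, if_true]
          exact ih (max m x) (max m x) i (i + 1) le_rfl (Or.inr ⟨rfl, rfl⟩)
        · simp only [pvLoopA, hx, if_false]
          refine ih (max m x) cur index (i + 1) (le_trans hcm (le_max_left _ _)) (Or.inl ?_)
          rcases h with ⟨y, hy, hlt⟩ | ⟨_, hcurm⟩
          · rcases List.mem_cons.mp hy with rfl | hy'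
            · exact absurd hlt hx
            · exact ⟨y, hy', hlt⟩
          · rcases hdip with ⟨y, hy, hlt⟩
            rcases List.mem_cons.mp hy with rfl | hy'
            · exact absurd (hcurm ▸ hlt) hx
            · exact ⟨y, hy', hcurm ▸ hlt⟩

-- the tail of B's rightMin array is the suffix-min array of the tail
lemma pv_suffixMins_tail (a : Int) (t : List Int) :
    (pvSuffixMins (a :: t)).tail = pvSuffixMins t := by
  cases t <;> simp [pvSuffixMins]

-- ===== VERDICT (by name: the statement is the Claim_ definition above) =====
theorem partitionDisjoint2_spec : Claim_equal_partitionDisjoint2 := by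
  intro A _ hpre
  unfold Spec_partitionDisjoint2
  match A with
  | [] => exact absurd rfl hpre
  | a :: t =>
      show pvLoopA (a :: t) 0 a a 0 + 1 = _
      have h1 : pvLoopA (a :: t) 0 a a 0 = pvLoopA t 0 a a 1 := by
        simp [pvLoopA]
      rw [h1, pv_main t a a 0 1 le_rfl (Or.inr ⟨rfl, rfl⟩)]
      simp only [partitionDisjoint2_alt, pv_suffixMins_tail]
      congr 1
      simp [List.length_cons]; ring
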